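-- pv_equiv track=rewrite | github.com/boostpapa/Bert-VITS2 | text/chinese.py | _clean_space
-- ===== SOURCE A (Python) =====
-- ENCHARS = 'abcdefghijklmnopqrstuvwxyz0123456789'
--
-- def _clean_space(text):
--     """"
--     处理多余的空格
--     """
--
--     clean_text = ''
--     enden = False
--     strs = text.split()
--     for ss in strs:
--         sten = True if ss[0].lower() in ENCHARS else False
--         clean_text += ' '+ss if enden and sten else ss
--         enden = True if ss[-1].lower() in ENCHARS else False
--     return clean_text
-- ===== SOURCE B (Python) =====
-- ENCHARS = 'abcdefghijklmnopqrstuvwxyz0123456789'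
--
-- def _clean_space(text):
--     # single pass over the characters: whitespace only sets a 'pending' flag;
--     # a non-space char flushes it, inserting one space iff both neighbours are alnum
--     out = []
--     pending = False
--     for c in text:
--         if c.isspace():
--             pending = True
--         else:
--             if pending and out and out[-1].lower() in ENCHARS and c.lower() in ENCHARS:
--                 out.append(' ')
--             out.append(c)
--             pending = False
--     return ''.join(out)
-- ===== Notes on version B (the rewrite author's own statement) =====
-- stated objective: simpler
-- what changed: A splits the text into tokens and re-joins them with a two-flag token state machine; B makes one direct pass over the characters, collapsing each whitespace run via a single seen-whitespace flag and inserting a space only when both neighbouring characters are alphanumeric.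
import Mathlib
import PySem

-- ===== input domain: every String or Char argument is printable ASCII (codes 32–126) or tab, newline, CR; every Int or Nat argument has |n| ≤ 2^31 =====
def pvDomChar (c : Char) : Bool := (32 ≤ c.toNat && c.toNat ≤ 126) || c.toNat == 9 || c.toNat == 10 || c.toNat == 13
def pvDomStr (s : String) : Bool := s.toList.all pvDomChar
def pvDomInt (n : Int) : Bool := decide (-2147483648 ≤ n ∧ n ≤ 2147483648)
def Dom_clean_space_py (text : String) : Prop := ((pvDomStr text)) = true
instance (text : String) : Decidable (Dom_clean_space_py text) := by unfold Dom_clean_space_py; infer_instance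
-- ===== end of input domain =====

-- B replaces A's split()-then-rejoin token state machine by one direct pass over the
-- characters with a seen-whitespace flag (objective: simpler; same output).

-- ENCHARS = 'abcdefghijklmnopqrstuvwxyz0123456789'
def pvEnchars : List Char := "abcdefghijklmnopqrstuvwxyz0123456789".toList

-- c.lower() in ENCHARS  (membership of a single char in the module constant)
def pvIsEn (c : Char) : Bool := pvEnchars.contains (PySem.Chars.lowerChar c)

-- ===== PORT A =====
-- one step of A's 'for ss in strs' loop; state = (clean_text, enden)
def pvStepA (st : List Char × Bool) (ss : List Char) : List Char × Bool :=
  let sten := match PySem.List.pyGet? ss (0 : Int) with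
    | some c => pvIsEn c
    | none => false   -- unreachable: split() yields non-empty tokens
  let clean_text := if st.2 && sten then st.1 ++ (' ' :: ss) else st.1 ++ ss
  let enden := match PySem.List.pyGet? ss (-1 : Int) with
    | some c => pvIsEn c
    | none => false   -- unreachable
  (clean_text, enden)

def clean_space_py (text : String) : String :=
  let strs := PySem.Chars.split₀ text.toList
  String.mk (strs.foldl pvStepA ([], false)).1

-- ===== PORT B =====
-- one step of B's 'for c in text' loop; state = (out, pending)
def pvStepB (st : List Char × Bool) (c : Char) : List Char × Bool :=
  if PySem.Chars.isspace c then (st.1, true)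
  else
    let out :=
      if st.2 && (match st.1.getLast? with
                  | some p => pvIsEn p
                  | none => false) && pvIsEn c
      then st.1 ++ [' '] else st.1
    (out ++ [c], false)

def clean_space_py_alt (text : String) : String :=
  String.mk (text.toList.foldl pvStepB ([], false)).1

-- ===== PRECONDITION & SPEC =====
def Spec_clean_space_py (text : String) (out : String) : Prop := out = clean_space_py_alt text
instance (text : String) (out : String) : Decidable (Spec_clean_space_py text out) := by unfold Spec_clean_space_py; infer_instance

-- ===== CLAIM (what is proved, stated in full; the proofs are below) =====
def Claim_equal_clean_space_py : Prop := ∀ (text : String), Dom_clean_space_py text → Spec_clean_space_py text (clean_space_py text)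

-- ===== LEMMAS AND PROOFS =====

-- 'en' of the last char of out ([] → false), the guard B reads off its output buffer
def pvE (out : List Char) : Bool :=
  match out.getLast? with
  | some p => pvIsEn p
  | none => false

-- A's join written as structural recursion over the token list (flag = space allowed)
def pvJ (e : Bool) : List (List Char) → List Char
  | [] => []
  | ss :: r =>
    let sten := match PySem.List.pyGet? ss (0 : Int) with
      | some c => pvIsEn c
      | none => false
    let enden := match PySem.List.pyGet? ss (-1 : Int) with
      | some c => pvIsEn c
      | none => false
    (if e && sten then ' ' :: ss else ss) ++ pvJ enden r

-- A's foldl over tokens is pvJ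
theorem pvFoldA (l : List (List Char)) : ∀ (acc : List Char) (e : Bool),
    (l.foldl pvStepA (acc, e)).1 = acc ++ pvJ e l := by
  induction l with
  | nil => intro acc e; simp [pvJ]
  | cons ss r ih =>
    intro acc e
    simp only [List.foldl_cons, pvStepA, pvJ]
    rw [ih]
    by_cases h : e && (match PySem.List.pyGet? ss (0 : Int) with
      | some c => pvIsEn c
      | none => false) <;> simp [h]

-- closed form of split₀.go (any cur/acc state)
theorem pvGoAll (s : List Char) : ∀ (cur : List Char) (acc : List (List Char)),
    PySem.Chars.split₀.go s cur acc =
      acc.reverse ++ (if cur.isEmpty then PySem.Chars.split₀.go s [] []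
        else (cur.reverse ++ s.takeWhile (fun c => !PySem.Chars.isspace c)) ::
             PySem.Chars.split₀.go (s.dropWhile (fun c => !PySem.Chars.isspace c)) [] []) := by
  induction s with
  | nil =>
    intro cur acc
    cases cur <;> simp [PySem.Chars.split₀.go]
  | cons c s ih =>
    intro cur acc
    by_cases hc : PySem.Chars.isspace c
    · cases cur with
      | nil => simp [PySem.Chars.split₀.go, hc, ih [] acc]
      | cons x xs =>
        simp only [PySem.Chars.split₀.go, hc, if_pos rfl, List.isEmpty_cons, List.takeWhile,
          List.dropWhile, Bool.not_true, if_true]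
        rw [ih [] ((x :: xs).reverse :: acc)]
        simp [PySem.Chars.split₀.go, hc]
    · simp only [PySem.Chars.split₀.go, hc, if_neg, Bool.false_eq_true, not_false_eq_true,
        List.takeWhile, List.dropWhile, Bool.not_false, if_true]
      rw [ih (c :: cur) acc]
      cases cur with
      | nil =>
        simp only [List.isEmpty_cons, List.isEmpty_nil]
        rw [ih [c] []]
        simp
      | cons x xs => simp

theorem pvSplitWs {c : Char} (hc : PySem.Chars.isspace c) (s : List Char) :
    PySem.Chars.split₀ (c :: s) = PySem.Chars.split₀ s := by
  simp [PySem.Chars.split₀, PySem.Chars.split₀.go, hc]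

theorem pvSplitTok {c : Char} (hc : ¬ PySem.Chars.isspace c) (s : List Char) :
    PySem.Chars.split₀ (c :: s) =
      (c :: s.takeWhile (fun c => !PySem.Chars.isspace c)) ::
        PySem.Chars.split₀ (s.dropWhile (fun c => !PySem.Chars.isspace c)) := by
  simp only [PySem.Chars.split₀, PySem.Chars.split₀.go, hc, if_neg, Bool.false_eq_true,
    not_false_eq_true]
  rw [pvGoAll]
  simp

-- ss[-1] ignores a cons in front of a non-empty list
theorem pvLastCons (c x : Char) (xs : List Char) :
    PySem.List.pyGet? (c :: x :: xs) (-1 : Int) = PySem.List.pyGet? (x :: xs) (-1 : Int) := by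
  simp [PySem.List.pyGet?, PySem.List.pyIdx?]
  rfl

-- head flag: does s begin with whitespace?
def pvWsHead : List Char → Bool
  | [] => false
  | c :: _ => PySem.Chars.isspace c

-- joining the rest of a token: prepending an emitted char c to the current token
theorem pvTok (s : List Char) (c : Char) :
    pvJ (pvWsHead s && pvIsEn c) (PySem.Chars.split₀ s) =
      s.takeWhile (fun c => !PySem.Chars.isspace c) ++
        pvJ (match PySem.List.pyGet? (c :: s.takeWhile (fun c => !PySem.Chars.isspace c)) (-1 : Int) with
             | some p => pvIsEn p
             | none => false)
          (PySem.Chars.split₀ (s.dropWhile (fun c => !PySem.Chars.isspace c))) := by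
  cases s with
  | nil => simp [PySem.Chars.split₀, PySem.Chars.split₀.go, pvJ, pvWsHead, PySem.List.pyGet?,
      PySem.List.pyIdx?]
  | cons c2 s2 =>
    by_cases h2 : PySem.Chars.isspace c2
    · simp only [pvWsHead, h2, Bool.true_and, List.takeWhile, List.dropWhile, Bool.not_true,
        if_neg, Bool.false_eq_true, not_false_eq_true, if_false, List.nil_append]
      rw [pvSplitWs h2]
      simp [PySem.List.pyGet?, PySem.List.pyIdx?]
    · rw [pvSplitTok h2]
      simp only [pvWsHead, h2, Bool.false_and, List.takeWhile, List.dropWhile, Bool.not_false,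
        if_true, pvJ]
      rw [pvLastCons]
      simp [PySem.List.pyGet?, PySem.List.pyIdx?, h2]

-- one step of pvJ on a cons-headed token
theorem pvJcons (e : Bool) (c : Char) (tw : List Char) (r : List (List Char)) :
    pvJ e ((c :: tw) :: r) =
      (if e && pvIsEn c then ' ' :: c :: tw else c :: tw) ++
        pvJ (match PySem.List.pyGet? (c :: tw) (-1 : Int) with
             | some p => pvIsEn p
             | none => false) r := by
  simp [pvJ, PySem.List.pyGet?, PySem.List.pyIdx?]

-- main invariant: B's char fold computes A's join of the remaining split
theorem pvMain (s : List Char) : ∀ (out : List Char) (p : Bool),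
    (s.foldl pvStepB (out, p)).1 =
      out ++ pvJ ((p || pvWsHead s) && pvE out) (PySem.Chars.split₀ s) := by
  induction s with
  | nil => intro out p; simp [pvJ, PySem.Chars.split₀, PySem.Chars.split₀.go]
  | cons c s ih =>
    intro out p
    rw [List.foldl_cons]
    by_cases hc : PySem.Chars.isspace c
    · have hstep : pvStepB (out, p) c = (out, true) := by simp [pvStepB, hc]
      rw [hstep, ih out true, pvSplitWs hc]
      simp [pvWsHead, hc]
    · have hEmatch : (match out.getLast? with
          | some q => pvIsEn q | none => false) = pvE out := rfl
      have hstep : pvStepB (out, p) c =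
          ((if p && pvE out && pvIsEn c then out ++ [' '] else out) ++ [c], false) := by
        simp only [pvStepB, hc, Bool.false_eq_true, if_neg, not_false_eq_true, if_false, hEmatch]
      rw [hstep, ih _ false]
      have hws : pvWsHead (c :: s) = false := by
        simp only [pvWsHead]; exact Bool.not_eq_true _ ▸ eq_false_of_ne_true hc
      have hguard : ((p || pvWsHead (c :: s)) && pvE out) = (p && pvE out) := by
        rw [hws]; cases p <;> simp
      have hE2 : pvE ((if p && pvE out && pvIsEn c then out ++ [' '] else out) ++ [c])
          = pvIsEn c := by
        split <;> simp [pvE]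
      rw [hE2, hguard, pvSplitTok hc, pvJcons]
      simp only [Bool.false_or]
      rw [pvTok s c]
      by_cases hg : (p && pvE out && pvIsEn c) = true
      · simp [hg, List.append_assoc]
      · rw [Bool.not_eq_true] at hg
        simp [hg, List.append_assoc]

-- ===== VERDICT (by name: the statement is the Claim_ definition above) =====
theorem clean_space_py_spec : Claim_equal_clean_space_py := by
  intro text _
  unfold Spec_clean_space_py clean_space_py clean_space_py_alt
  show String.mk (List.foldl pvStepA ([], false) (PySem.Chars.split₀ text.toList)).1
      = String.mk (List.foldl pvStepB ([], false) text.toList).1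
  rw [pvMain text.toList [] false]
  rw [pvFoldA (PySem.Chars.split₀ text.toList) [] false]
  simp [pvE]
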